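-- pv_equiv track=rewrite | github.com/strawgate/memagent | scripts/verify_verification_trigger_contract.py | _collect_step_lines
-- ===== SOURCE A (Python) =====
-- def _collect_step_lines(job_block: list[str], idx: int) -> list[str]:
--     step_start = idx
--     step_item_indent = None
--     for back_idx in range(idx, -1, -1):
--         candidate = job_block[back_idx]
--         candidate_stripped = candidate.strip()
--         candidate_indent = len(candidate) - len(candidate.lstrip(" "))
--         if candidate_stripped.startswith("- "):
--             step_start = back_idx
--             step_item_indent = candidate_indent
--             break
--
--     if step_item_indent is None:
--         step_item_indent = len(job_block[idx]) - len(job_block[idx].lstrip(" "))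
--
--     step_lines = [job_block[step_start]]
--     for next_line in job_block[step_start + 1 :]:
--         next_stripped = next_line.strip()
--         next_indent = len(next_line) - len(next_line.lstrip(" "))
--         if next_stripped.startswith("- ") and next_indent == step_item_indent:
--             break
--         step_lines.append(next_line)
--     return step_lines
-- ===== SOURCE B (Python) =====
-- def _collect_step_lines(job_block: list[str], idx: int) -> list[str]:
--     # One pass builds an index of step-item boundaries; the answer is a slice
--     # between two table lookups.
--     bounds = [
--         (i, len(line) - len(line.lstrip(" ")))
--         for i, line in enumerate(job_block)
--         if line.strip().startswith("- ")
--     ]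
--     prev = [p for p in bounds if p[0] <= idx]
--     if prev:
--         step_start, step_item_indent = prev[-1]
--     else:
--         step_start = idx
--         line = job_block[idx]
--         step_item_indent = len(line) - len(line.lstrip(" "))
--     nxt = [p for p in bounds if step_start < p[0] and p[1] == step_item_indent]
--     end = nxt[0][0] if nxt else len(job_block)
--     return job_block[step_start:end]
-- ===== Notes on version B (the rewrite author's own statement) =====
-- stated objective: alternative
-- what changed: Replaces A's two inline directional break-loops (backward scan for the step start, forward scan for the step end) with a single enumerate pass that builds a table of '- ' boundary records (index, indent), from which start and end are read off by table lookups and the result is one slice.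
-- outside the precondition, e.g. on _collect_step_lines(['- a', '  b'], -1): A returns ['  b', '- a', '  b'], B returns ['  b']
import Mathlib
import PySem

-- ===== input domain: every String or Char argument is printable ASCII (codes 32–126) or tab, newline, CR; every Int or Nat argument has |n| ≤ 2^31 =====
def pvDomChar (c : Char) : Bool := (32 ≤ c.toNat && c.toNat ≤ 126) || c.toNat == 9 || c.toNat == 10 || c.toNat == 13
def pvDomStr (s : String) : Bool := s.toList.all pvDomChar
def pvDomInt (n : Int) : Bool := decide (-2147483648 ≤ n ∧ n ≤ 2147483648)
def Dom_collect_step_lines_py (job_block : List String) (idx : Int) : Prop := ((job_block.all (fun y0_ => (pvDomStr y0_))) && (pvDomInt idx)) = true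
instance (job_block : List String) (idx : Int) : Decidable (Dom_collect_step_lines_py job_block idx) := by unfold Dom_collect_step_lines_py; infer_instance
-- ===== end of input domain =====

-- B replaces A's two inline directional break-loops by a boundary-index table built in one
-- enumerate pass, plus table lookups and a slice (alternative decomposition, same cost).


-- ===== PORT A =====
-- candidate.strip().startswith("- ")
def pvIsB (s : String) : Bool := PySem.Str.startswith (PySem.Str.strip s) "- "
-- len(s) - len(s.lstrip(" ")): hand port (PySem has no lstrip with a chars argument); exact,
-- since s.lstrip(" ") removes exactly the leading ' ' characters, the difference of lengths
-- is the number of leading spaces.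
def pvIndent (s : String) : Int := ((s.toList.takeWhile (fun c => c == ' ')).length : Int)

-- the backward 'for back_idx in range(idx, -1, -1): … break' loop of A
def pvBackLoop (job_block : List String) : List Int → Option (Int × Int)
  | [] => none
  | i :: rest =>
    let candidate := PySem.List.pyGetD job_block i ""
    if pvIsB candidate then some (i, pvIndent candidate)
    else pvBackLoop job_block rest

-- the forward 'for next_line in job_block[step_start + 1:]: … break' loop of A
def pvFwdLoop (ind : Int) (acc : List String) : List String → List String
  | [] => acc
  | l :: rest =>
    if pvIsB l && pvIndent l == ind then acc
    else pvFwdLoop ind (acc ++ [l]) rest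

def collect_step_lines_py (job_block : List String) (idx : Int) : List String :=
  let st : Int × Int :=
    match pvBackLoop job_block (PySem.List.pyRange idx (-1) (-1)) with
    | some p => p
    | none => (idx, pvIndent (PySem.List.pyGetD job_block idx ""))
  let step_lines := [PySem.List.pyGetD job_block st.1 ""]
  pvFwdLoop st.2 step_lines (PySem.List.slice job_block (some (st.1 + 1)) none)

-- ===== PORT B =====
-- the boundary table: [(i, indent) for i, line in enumerate(job_block) if line.strip().startswith("- ")]
def pvBounds (job_block : List String) : List (Int × Int) :=
  ((PySem.List.enumerate job_block 0).filter (fun p => pvIsB p.2)).map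
    (fun p => (p.1, pvIndent p.2))

def collect_step_lines_py_alt (job_block : List String) (idx : Int) : List String :=
  let bounds := pvBounds job_block
  let prev := bounds.filter (fun p => decide (p.1 ≤ idx))
  let st : Int × Int :=
    match prev.getLast? with
    | some p => p
    | none => (idx, pvIndent (PySem.List.pyGetD job_block idx ""))
  let nxt := bounds.filter (fun p => decide (st.1 < p.1) && p.2 == st.2)
  let ending :=
    match nxt.head? with
    | some p => p.1
    | none => (job_block.length : Int)
  PySem.List.slice job_block (some st.1) (some ending)

-- ===== PRECONDITION & SPEC =====
-- Pre_ excludes idx outside [0, len(job_block)): for idx ≥ len or idx < -len A raises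
-- IndexError, and for -len ≤ idx < 0 A's returned value is an accident of Python's
-- negative-index wraparound combined with the slice job_block[step_start+1:] re-reading
-- the whole list; B returns the natural (non-wrapped) slice there.
def Pre_collect_step_lines_py (job_block : List String) (idx : Int) : Prop :=
  0 ≤ idx ∧ idx < (job_block.length : Int)
instance (job_block : List String) (idx : Int) : Decidable (Pre_collect_step_lines_py job_block idx) := by unfold Pre_collect_step_lines_py; infer_instance

def pvWitness_collect_step_lines_py : List String × Int := (["- a", "  b"], 0)

def Spec_collect_step_lines_py (job_block : List String) (idx : Int) (out : List String) : Prop := out = collect_step_lines_py_alt job_block idx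
instance (job_block : List String) (idx : Int) (out : List String) : Decidable (Spec_collect_step_lines_py job_block idx out) := by unfold Spec_collect_step_lines_py; infer_instance

-- ===== CLAIM (what is proved, stated in full; the proofs are below) =====
def Claim_equal_collect_step_lines_py : Prop := ∀ (job_block : List String) (idx : Int), Dom_collect_step_lines_py job_block idx → Pre_collect_step_lines_py job_block idx → Spec_collect_step_lines_py job_block idx (collect_step_lines_py job_block idx)


-- ===== LEMMAS AND PROOFS =====

-- find? respects pointwise-equal predicates on the list's members
theorem pv_find?_congr {α : Type} (p q : α → Bool) :
    ∀ (l : List α), (∀ x ∈ l, p x = q x) → l.find? p = l.find? q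
  | [], _ => rfl
  | x :: l, h => by
    have hx := h x (by simp)
    simp only [List.find?, hx]
    cases hq : q x with
    | true => rfl
    | false => exact pv_find?_congr p q l (fun y hy => h y (by simp [hy]))

-- enumerate as a map over the index range
theorem pv_enum_eq (jb : List String) :
    PySem.List.enumerate jb 0 =
      (PySem.List.pyRange 0 (jb.length : Int) 1).map
        (fun i => (i, PySem.List.pyGetD jb i "")) := by
  apply List.ext_getElem
  · simp [PySem.List.length_enumerate, PySem.List.pyRange_one]
  · intro k h1 h2
    have hk : k < jb.length := by
      simpa [PySem.List.length_enumerate] using h1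
    rw [PySem.List.getElem_enumerate, List.getElem_map, PySem.List.getElem_pyRange_one]
    have : (0 : Int) + (k : Int) = ((k : Nat) : Int) := by omega
    rw [this, PySem.List.pyGetD_natCast, List.getD_eq_getElem jb "" hk]

-- A's backward break-loop is a find? over the index list
theorem pv_backLoop_eq (jb : List String) :
    ∀ (is : List Int), pvBackLoop jb is =
      (is.find? (fun i => pvIsB (PySem.List.pyGetD jb i ""))).map
        (fun i => (i, pvIndent (PySem.List.pyGetD jb i "")))
  | [] => rfl
  | i :: rest => by
    simp only [pvBackLoop, List.find?]
    cases h : pvIsB (PySem.List.pyGetD jb i "") with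
    | true => simp
    | false => simp [pv_backLoop_eq jb rest]

-- A's forward break-loop is an append of a takeWhile
theorem pv_fwdLoop_eq (ind : Int) :
    ∀ (l acc : List String), pvFwdLoop ind acc l =
      acc ++ l.takeWhile (fun x => !(pvIsB x && pvIndent x == ind))
  | [], acc => by simp [pvFwdLoop]
  | x :: l, acc => by
    simp only [pvFwdLoop, List.takeWhile]
    cases h : pvIsB x && pvIndent x == ind with
    | true => simp
    | false => simp [pv_fwdLoop_eq ind l (acc ++ [x])]

-- indexing jb at a+k is indexing (jb.drop a) at k
theorem pv_getD_drop (jb : List String) (a k : Nat) (d : String) :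
    PySem.List.pyGetD jb (((a : Nat) : Int) + ((k : Nat) : Int)) d = (jb.drop a).getD k d := by
  have h : ((a : Nat) : Int) + ((k : Nat) : Int) = ((a + k : Nat) : Int) := by push_cast; ring
  rw [h, PySem.List.pyGetD_natCast, List.getD_eq_getElem?_getD, List.getD_eq_getElem?_getD,
    List.getElem?_drop]

-- takeWhile(not pr) is a take up to the first index where pr holds
theorem pv_takeWhile_eq (pr : String → Bool) :
    ∀ (r : List String),
      r.takeWhile (fun x => !pr x) =
        (match (List.range r.length).find? (fun k => pr (r.getD k "")) with
         | some k => r.take k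
         | none => r)
  | [] => rfl
  | x :: r => by
    rw [List.length_cons, List.range_succ_eq_map]
    cases h : pr x with
    | true => simp [List.find?, h, List.takeWhile]
    | false =>
      have hfm : (List.map Nat.succ (List.range r.length)).find?
            (fun k => pr ((x :: r).getD k "")) =
          ((List.range r.length).find? (fun k => pr (r.getD k ""))).map Nat.succ := by
        rw [List.find?_map]
        congr 1
      simp only [List.find?, List.getD_cons_zero, h, List.takeWhile, Bool.not_false, hfm]
      rw [pv_takeWhile_eq pr r]
      cases hf : (List.range r.length).find? (fun k => pr (r.getD k "")) with
      | none => simp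
      | some k => simp [List.take_succ_cons]

-- the backward scan of A equals the last boundary-table record with index ≤ j
theorem pv_back_main (jb : List String) (j : Nat) (hj : j < jb.length) :
    pvBackLoop jb (PySem.List.pyRange ((j : Nat) : Int) (-1) (-1)) =
      ((pvBounds jb).filter (fun p => decide (p.1 ≤ ((j : Nat) : Int)))).getLast? := by
  have hsplit : PySem.List.pyRange 0 ((jb.length : Nat) : Int) 1 =
      PySem.List.pyRange 0 (((j : Nat) : Int) + 1) 1 ++
        PySem.List.pyRange (((j : Nat) : Int) + 1) ((jb.length : Nat) : Int) 1 :=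
    PySem.List.pyRange_one_append _ _ _ (by omega) (by omega)
  unfold pvBounds
  rw [pv_enum_eq, List.filter_map, List.filter_filter, List.filter_map, List.map_map,
    List.getLast?_map, List.getLast?_eq_head?_reverse, ← List.filter_reverse, List.head?_filter,
    pv_backLoop_eq, PySem.List.pyRange_neg_one_eq_reverse]
  have h01 : (-1 : Int) + 1 = 0 := by norm_num
  rw [h01, hsplit, List.reverse_append, List.find?_append]
  simp only [Function.comp_def]
  have h1 : List.find? (fun x => decide (x ≤ ((j : Nat) : Int)) && pvIsB (PySem.List.pyGetD jb x ""))
      (PySem.List.pyRange (((j : Nat) : Int) + 1) ((jb.length : Nat) : Int) 1).reverse = none := by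
    apply List.find?_eq_none.mpr
    intro a ha
    simp only [List.mem_reverse, PySem.List.mem_pyRange_one] at ha
    have hd : decide (a ≤ ((j : Nat) : Int)) = false := by simp; omega
    simp [hd]
  have h2 : List.find? (fun x => decide (x ≤ ((j : Nat) : Int)) && pvIsB (PySem.List.pyGetD jb x ""))
        (PySem.List.pyRange 0 (((j : Nat) : Int) + 1) 1).reverse =
      List.find? (fun i => pvIsB (PySem.List.pyGetD jb i ""))
        (PySem.List.pyRange 0 (((j : Nat) : Int) + 1) 1).reverse := by
    apply pv_find?_congr
    intro a ha
    simp only [List.mem_reverse, PySem.List.mem_pyRange_one] at ha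
    have hd : decide (a ≤ ((j : Nat) : Int)) = true := by simp; omega
    simp [hd]
  rw [h1, h2, Option.none_or]

-- the forward scan of A from step start s equals B's slice up to the next matching boundary
theorem pv_fwd_main (jb : List String) (s : Nat) (ind : Int) (hs : s < jb.length) :
    pvFwdLoop ind [PySem.List.pyGetD jb ((s : Nat) : Int) ""]
        (PySem.List.slice jb (some (((s : Nat) : Int) + 1)) none)
    = PySem.List.slice jb (some ((s : Nat) : Int))
        (some (match ((pvBounds jb).filter
                  (fun p => decide (((s : Nat) : Int) < p.1) && p.2 == ind)).head? with
               | some p => p.1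
               | none => (jb.length : Int))) := by
  have hcast : ((s : Nat) : Int) + 1 = ((s + 1 : Nat) : Int) := by push_cast; ring
  have hsplit : PySem.List.pyRange 0 ((jb.length : Nat) : Int) 1 =
      PySem.List.pyRange 0 ((s + 1 : Nat) : Int) 1 ++
        PySem.List.pyRange ((s + 1 : Nat) : Int) ((jb.length : Nat) : Int) 1 :=
    PySem.List.pyRange_one_append _ _ _ (by omega) (by omega)
  rw [hcast, PySem.List.slice_from_natCast, pv_fwdLoop_eq]
  unfold pvBounds
  rw [pv_enum_eq, List.filter_map, List.filter_filter, List.filter_map, List.map_map,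
    List.head?_map, List.head?_filter, hsplit, List.find?_append]
  simp only [Function.comp_def]
  have h1 : List.find?
      (fun x => decide (((s : Nat) : Int) < x) && pvIndent (PySem.List.pyGetD jb x "") == ind &&
        pvIsB (PySem.List.pyGetD jb x ""))
      (PySem.List.pyRange 0 ((s + 1 : Nat) : Int) 1) = none := by
    apply List.find?_eq_none.mpr
    intro a ha
    simp only [PySem.List.mem_pyRange_one] at ha
    have hd : decide (((s : Nat) : Int) < a) = false := by simp; omega
    simp [hd]
  rw [h1, Option.none_or,
    PySem.List.pyRange_one ((s + 1 : Nat) : Int) ((jb.length : Nat) : Int), List.find?_map]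
  have hm : (((jb.length : Nat) : Int) - ((s + 1 : Nat) : Int)).toNat =
      (List.drop (s + 1) jb).length := by simp; omega
  rw [hm]
  have h2 : (List.range (List.drop (s + 1) jb).length).find?
        ((fun x => decide (((s : Nat) : Int) < x) && pvIndent (PySem.List.pyGetD jb x "") == ind &&
          pvIsB (PySem.List.pyGetD jb x "")) ∘ fun k => ((s + 1 : Nat) : Int) + (k : Nat)) =
      (List.range (List.drop (s + 1) jb).length).find?
        (fun k => pvIsB ((List.drop (s + 1) jb).getD k "") &&
          pvIndent ((List.drop (s + 1) jb).getD k "") == ind) := by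
    apply pv_find?_congr
    intro k _
    simp only [Function.comp_def, pv_getD_drop]
    have hd : decide (((s : Nat) : Int) < ((s + 1 : Nat) : Int) + ((k : Nat) : Int)) = true := by
      simp; omega
    simp only [hd, Bool.true_and]
    rw [Bool.and_comm]
  rw [h2, pv_takeWhile_eq (fun x => pvIsB x && pvIndent x == ind) (List.drop (s + 1) jb)]
  cases hf : (List.range (List.drop (s + 1) jb).length).find?
      (fun k => pvIsB ((List.drop (s + 1) jb).getD k "") &&
        pvIndent ((List.drop (s + 1) jb).getD k "") == ind) with
  | none =>
    simp only [Option.map_none]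
    rw [PySem.List.slice_natCast, PySem.List.pyGetD_natCast, List.getD_eq_getElem jb "" hs,
      List.drop_eq_getElem_cons hs]
    have hns : jb.length - s = (jb.length - (s + 1)) + 1 := by omega
    rw [hns, List.take_succ_cons]
    have ht : List.take (jb.length - (s + 1)) (List.drop (s + 1) jb) = List.drop (s + 1) jb :=
      List.take_of_length_le (by simp)
    rw [ht]
    simp
  | some k =>
    have hk : k < (List.drop (s + 1) jb).length :=
      List.mem_range.mp (List.mem_of_find?_eq_some hf)
    have hcast2 : ((s + 1 : Nat) : Int) + ((k : Nat) : Int) = ((s + 1 + k : Nat) : Int) := by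
      push_cast; ring
    simp only [Option.map_some]
    rw [hcast2, PySem.List.slice_natCast, PySem.List.pyGetD_natCast, List.getD_eq_getElem jb "" hs]
    have hns : s + 1 + k - s = k + 1 := by omega
    rw [hns, List.drop_eq_getElem_cons hs, List.take_succ_cons]
    simp

-- ===== VERDICT (by name: the statement is the Claim_ definition above) =====
theorem collect_step_lines_py_spec : Claim_equal_collect_step_lines_py := by
  intro jb idx hdom hpre
  unfold Spec_collect_step_lines_py
  obtain ⟨h0, h1⟩ := hpre
  obtain ⟨j, rfl⟩ : ∃ j : Nat, idx = ((j : Nat) : Int) :=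
    ⟨idx.toNat, (Int.toNat_of_nonneg h0).symm⟩
  have hj : j < jb.length := by exact_mod_cast h1
  simp only [collect_step_lines_py, collect_step_lines_py_alt, pv_back_main jb j hj]
  cases hB : ((pvBounds jb).filter (fun p => decide (p.1 ≤ ((j : Nat) : Int)))).getLast? with
  | none => exact pv_fwd_main jb j _ hj
  | some p =>
    obtain ⟨p1, p2⟩ := p
    have hpm : (p1, p2) ∈ List.filter (fun p => decide (p.1 ≤ ((j : Nat) : Int))) (pvBounds jb) :=
      List.mem_of_getLast? hB
    have hp2 := List.mem_filter.mp hpm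
    have hb : ∃ s : Nat, s < jb.length ∧ p1 = ((s : Nat) : Int) := by
      have hmem := hp2.1
      simp only [pvBounds, List.mem_map, List.mem_filter, PySem.List.mem_enumerate_iff] at hmem
      obtain ⟨q, ⟨⟨k, hk, hq⟩, -⟩, hfq⟩ := hmem
      refine ⟨k, hk, ?_⟩
      have := congrArg Prod.fst hfq
      simp [hq] at this
      omega
    obtain ⟨s, hs, hp1⟩ := hb
    subst hp1
    exact pv_fwd_main jb s p2 hs
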